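-- pv_equiv track=rewrite | github.com/akko963/python-sudoku | sudoku_helper.py | collision_entries
-- ===== SOURCE A (Python) =====
-- def collision_entries(slots):
--     slots = sorted(set(slots))
--     if len(slots) <= 1:
--         return slots
--     for i in range(len(slots) - 1):
--         if slots[i][0] == slots[i + 1][0] and slots[i][1] == slots[i + 1][1]:
--             return []
--     return slots
-- ===== SOURCE B (Python) =====
-- def collision_entries(slots):
--     unique = set(slots)
--     if len(unique) <= 1:
--         return sorted(unique)
--     prefixes = {(s[0], s[1]) for s in unique}
--     if len(prefixes) < len(unique):
--         return []
--     return sorted(unique)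
-- ===== Notes on version B (the rewrite author's own statement) =====
-- stated objective: simpler
-- what changed: B detects a (row, col) collision by comparing the cardinality of the set of (s[0], s[1]) prefixes against the number of unique slots, instead of A's sort-then-adjacent-pair scan; it still sorts only to produce the output.
import Mathlib
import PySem

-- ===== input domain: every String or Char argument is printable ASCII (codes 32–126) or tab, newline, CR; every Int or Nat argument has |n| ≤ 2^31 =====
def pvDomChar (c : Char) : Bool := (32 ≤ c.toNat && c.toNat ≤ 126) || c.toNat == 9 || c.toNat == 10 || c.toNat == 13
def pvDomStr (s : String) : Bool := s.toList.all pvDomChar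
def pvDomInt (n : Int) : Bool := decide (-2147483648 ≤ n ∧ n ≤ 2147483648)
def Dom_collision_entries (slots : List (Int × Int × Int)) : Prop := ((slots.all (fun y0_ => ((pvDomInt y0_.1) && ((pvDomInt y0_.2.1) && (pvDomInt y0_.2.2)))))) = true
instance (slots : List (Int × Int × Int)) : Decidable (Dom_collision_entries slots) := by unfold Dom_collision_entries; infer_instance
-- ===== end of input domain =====

-- B replaces A's sort-then-adjacent-pair collision scan by comparing the number of distinct
-- (row, col) prefixes against the number of distinct slots (objective: simpler).

-- ===== PORT A =====
-- Python compares triples lexicographically; this injective key encodes that order exactly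
-- (Mathlib's plain `<` on products is the pointwise order, not Python's).
def pvLexKey (t : Int × Int × Int) : Int ×ₗ (Int ×ₗ Int) := toLex (t.1, toLex (t.2.1, t.2.2))

-- the `for i in range(len(slots)-1)` adjacent scan: returns true iff some adjacent pair
-- agrees on its first two components (Python then returns [])
def pvAdjScan : List (Int × Int × Int) → Bool
  | a :: b :: rest => (a.1 == b.1 && a.2.1 == b.2.1) || pvAdjScan (b :: rest)
  | _ => false

def collision_entries (slots : List (Int × Int × Int)) : List (Int × Int × Int) :=
  let s := PySem.List.sorted (PySem.Set.ofList slots) pvLexKey false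
  if s.length ≤ 1 then s
  else if pvAdjScan s then [] else s

-- ===== PORT B =====
def collision_entries_alt (slots : List (Int × Int × Int)) : List (Int × Int × Int) :=
  let unique := PySem.Set.ofList slots
  if unique.length ≤ 1 then PySem.List.sorted unique pvLexKey false
  else
    let prefixes := PySem.Set.ofList (unique.map (fun s => (s.1, s.2.1)))
    if prefixes.length < unique.length then []
    else PySem.List.sorted unique pvLexKey false

-- ===== PRECONDITION & SPEC =====
def Spec_collision_entries (slots : List (Int × Int × Int)) (out : List (Int × Int × Int)) : Prop := out = collision_entries_alt slots
instance (slots : List (Int × Int × Int)) (out : List (Int × Int × Int)) : Decidable (Spec_collision_entries slots out) := by unfold Spec_collision_entries; infer_instance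

-- ===== CLAIM (what is proved, stated in full; the proofs are below) =====
def Claim_equal_collision_entries : Prop := ∀ (slots : List (Int × Int × Int)), Dom_collision_entries slots → Spec_collision_entries slots (collision_entries slots)

-- ===== LEMMAS AND PROOFS =====

-- the prefix of a slot
def pvPfx (t : Int × Int × Int) : Int × Int := (t.1, t.2.1)

-- strict lexicographic order on triples, unfolded to components
def pvLt3 (a b : Int × Int × Int) : Prop :=
  a.1 < b.1 ∨ (a.1 = b.1 ∧ (a.2.1 < b.2.1 ∨ (a.2.1 = b.2.1 ∧ a.2.2 < b.2.2)))

lemma pvLexKey_lt_iff (a b : Int × Int × Int) : pvLexKey a < pvLexKey b ↔ pvLt3 a b := by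
  simp [pvLexKey, pvLt3, Prod.Lex.toLex_lt_toLex]

lemma pvLt3_of_le_ne {a b : Int × Int × Int} (hle : pvLexKey a ≤ pvLexKey b) (hne : a ≠ b) :
    pvLt3 a b := by
  rcases lt_or_eq_of_le hle with h | h
  · exact (pvLexKey_lt_iff a b).mp h
  · exfalso; apply hne
    have h1 := congrArg (fun x : Int ×ₗ (Int ×ₗ Int) => (ofLex x).1) h
    have h2 := congrArg (fun x : Int ×ₗ (Int ×ₗ Int) => (ofLex (ofLex x).2).1) h
    have h3 := congrArg (fun x : Int ×ₗ (Int ×ₗ Int) => (ofLex (ofLex x).2).2) h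
    simp [pvLexKey] at h1 h2 h3
    exact Prod.ext h1 (Prod.ext h2 h3)

-- the sorted dedup list is pairwise strictly increasing (componentwise lex)
lemma pvSorted_pairwise_lt3 (u : List (Int × Int × Int)) (hu : u.Nodup) :
    (PySem.List.sorted u pvLexKey false).Pairwise pvLt3 := by
  have hp := PySem.List.sorted_pairwise u pvLexKey
  have hn : (PySem.List.sorted u pvLexKey false).Nodup :=
    (PySem.List.sorted_perm u pvLexKey false).nodup_iff.mpr hu
  have := List.Pairwise.and hp hn
  exact this.imp (fun h => pvLt3_of_le_ne h.1 h.2)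

-- key step: in a strictly lex-sorted list, some adjacent pair shares its prefix
-- iff the mapped prefix list has a duplicate
lemma pvAdjScan_iff (L : List (Int × Int × Int)) (h : L.Pairwise pvLt3) :
    pvAdjScan L = true ↔ ¬ (L.map pvPfx).Nodup := by
  induction L with
  | nil => simp [pvAdjScan]
  | cons a t ih =>
    cases t with
    | nil => simp [pvAdjScan]
    | cons b rest =>
      rcases List.pairwise_cons.mp h with ⟨ha, ht⟩
      by_cases hpf : pvPfx a = pvPfx b
      · constructor
        · intro _
          simp only [List.map_cons, List.nodup_cons]
          intro ⟨hnm, _⟩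
          exact hnm (by simp [hpf])
        · intro _
          have : a.1 = b.1 ∧ a.2.1 = b.2.1 := by
            have := congrArg Prod.fst hpf
            have := congrArg Prod.snd hpf
            constructor <;> simp_all [pvPfx]
          simp [pvAdjScan, this.1, this.2]
      · -- prefixes differ; a's prefix is strictly below every later prefix
        have hscan : pvAdjScan (a :: b :: rest) = pvAdjScan (b :: rest) := by
          have : ¬ (a.1 = b.1 ∧ a.2.1 = b.2.1) := by
            intro ⟨h1, h2⟩; exact hpf (by simp [pvPfx, h1, h2])
          simp [pvAdjScan]
          intro h1 h2; exact absurd ⟨h1, h2⟩ this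
        have hnotmem : pvPfx a ∉ (b :: rest).map pvPfx := by
          -- pvLt3 a b with different prefixes gives strict prefix order a < b;
          -- pairwise gives pvLt3 a c hence prefix a ≤ prefix c for all later c;
          -- combined with pvLt3 b c this forces prefix a ≠ prefix c
          have hab : a.1 < b.1 ∨ (a.1 = b.1 ∧ a.2.1 < b.2.1) := by
            rcases ha b (by simp) with h1 | ⟨h1, h2 | ⟨h2, _⟩⟩
            · exact Or.inl h1
            · exact Or.inr ⟨h1, h2⟩
            · exact absurd (by simp [pvPfx, h1, h2]) hpf
          intro hmem
          rcases List.mem_map.mp hmem with ⟨c, hc, hcpfx⟩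
          have hc1 : a.1 = c.1 := by have := congrArg Prod.fst hcpfx; simpa [pvPfx] using this.symm
          have hc2 : a.2.1 = c.2.1 := by have := congrArg Prod.snd hcpfx; simpa [pvPfx] using this.symm
          rcases List.mem_cons.mp hc with hc | hc
          · subst hc; rcases hab with h1 | ⟨h1, h2⟩ <;> omega
          · have hbc := (List.pairwise_cons.mp ht).1 c hc
            rcases hbc with h1 | ⟨h1, h2 | ⟨h2, _⟩⟩ <;> rcases hab with g1 | ⟨g1, g2⟩ <;> omega
        rw [hscan, ih ht]
        simp only [List.map_cons, List.nodup_cons]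
        constructor
        · intro hnd hcnj
          exact hnd hcnj.2
        · intro hcnj hnd
          exact hcnj ⟨by simpa using hnotmem, hnd⟩

-- |set(m)| as a Finset cardinality
lemma pvOfList_length (m : List (Int × Int)) :
    (PySem.Set.ofList m : List (Int × Int)).length = m.toFinset.card := by
  rw [← List.toFinset_card_of_nodup (PySem.Set.nodup_ofList m)]
  congr 1
  ext x
  simp [PySem.Set.mem_ofList]

lemma pv_nodup_of_card_eq (m : List (Int × Int)) (h : m.toFinset.card = m.length) : m.Nodup := by
  have := (Multiset.toFinset_card_eq_card_iff_nodup (m := (↑m : Multiset (Int × Int)))).mp (by simpa using h)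
  simpa using this

lemma pvOfList_lt_iff (m : List (Int × Int)) :
    (PySem.Set.ofList m : List (Int × Int)).length < m.length ↔ ¬ m.Nodup := by
  rw [pvOfList_length]
  constructor
  · intro hlt hnd
    rw [List.toFinset_card_of_nodup hnd] at hlt
    omega
  · intro hnd
    rcases lt_or_eq_of_le (List.toFinset_card_le m) with h | h
    · exact h
    · exact absurd (pv_nodup_of_card_eq m h) hnd

-- the main condition equivalence, for u the dedup list
lemma pvCond_iff (u : List (Int × Int × Int)) (hu : u.Nodup) :
    pvAdjScan (PySem.List.sorted u pvLexKey false) = true ↔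
      (PySem.Set.ofList (u.map (fun s => (s.1, s.2.1))) : List (Int × Int)).length < u.length := by
  rw [pvAdjScan_iff _ (pvSorted_pairwise_lt3 u hu)]
  have hlen : (u.map (fun s : Int × Int × Int => (s.1, s.2.1))).length = u.length := by simp
  rw [← hlen, pvOfList_lt_iff]
  have hperm : ((PySem.List.sorted u pvLexKey false).map pvPfx).Perm
      (u.map (fun s : Int × Int × Int => (s.1, s.2.1))) :=
    List.Perm.map _ (PySem.List.sorted_perm u pvLexKey false)
  rw [hperm.nodup_iff]

-- ===== VERDICT (by name: the statement is the Claim_ definition above) =====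
theorem collision_entries_spec : Claim_equal_collision_entries := by
  intro slots _
  unfold Spec_collision_entries collision_entries collision_entries_alt
  have hnodup : (PySem.Set.ofList slots : List (Int × Int × Int)).Nodup :=
    PySem.Set.nodup_ofList slots
  simp only [PySem.List.length_sorted]
  by_cases h1 : (PySem.Set.ofList slots : List (Int × Int × Int)).length ≤ 1
  · simp [h1]
  · simp only [h1, if_false]
    have hiff := pvCond_iff (PySem.Set.ofList slots) hnodup
    by_cases h2 : pvAdjScan (PySem.List.sorted (PySem.Set.ofList slots) pvLexKey false) = true
    · rw [if_pos h2, if_pos (hiff.mp h2)]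
    · rw [if_neg h2, if_neg (fun hc => h2 (hiff.mpr hc))]
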